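-- pv_equiv track=rewrite | github.com/Stardust-lf/fhe-reliability-gpu | rfhe_framewk/src/barrett_test/outer_check.py | fold_mod_2k_plus_1
-- ===== SOURCE A (Python) =====
-- def fold_mod_2k_plus_1(x, k):
--     M = (1 << k) + 1
--     mask = (1 << k) - 1
--     # 只需处理到 64 位；最多 ceil(64/k) 段
--     acc = 0
--     sign = 1
--     segs = (64 + k - 1)//k
--     for i in range(segs):
--         seg = (x >> (i*k)) & mask
--         acc += sign * seg
--         acc %= M
--         sign *= -1
--     return acc % M
-- ===== SOURCE B (Python) =====
-- def fold_mod_2k_plus_1(x, k):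
--     B = 1 << k
--     segs = (64 + k - 1) // k
--     # stage 1: peel the base-2^k digits off x by repeated divmod
--     digits = []
--     q = x
--     for _ in range(segs):
--         q, r = divmod(q, B)
--         digits.append(r)
--     M = B + 1
--     del B  # free the large 2^k temporary before the reduction stage
--     # stage 2: Horner fold of the digits, high to low (2^k == -1 mod M)
--     acc = 0
--     for r in reversed(digits):
--         acc = (r - acc) % M
--     return acc
-- ===== Notes on version B (the rewrite author's own statement) =====
-- stated objective: alternative
-- what changed: Replaces A's single indexed shift-and-mask loop carrying an (acc, sign) state pair by two staged passes: first extract the base-2^k digits of x by repeated divmod into a list, then Horner-fold that list high-to-low with acc = (r - acc) % M, eliminating the mask, the shifts, the index arithmetic and the sign variable.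
import Mathlib
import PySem

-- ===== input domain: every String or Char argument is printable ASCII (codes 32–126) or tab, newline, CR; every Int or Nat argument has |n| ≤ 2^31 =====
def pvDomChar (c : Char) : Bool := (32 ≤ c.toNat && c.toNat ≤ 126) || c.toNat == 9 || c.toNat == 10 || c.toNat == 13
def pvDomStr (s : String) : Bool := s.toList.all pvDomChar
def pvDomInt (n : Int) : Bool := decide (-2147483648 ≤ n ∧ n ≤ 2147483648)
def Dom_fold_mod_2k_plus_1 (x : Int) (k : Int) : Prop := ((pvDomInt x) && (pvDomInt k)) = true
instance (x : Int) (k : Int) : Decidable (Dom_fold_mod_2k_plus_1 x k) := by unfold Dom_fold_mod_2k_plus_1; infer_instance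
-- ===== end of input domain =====

-- B replaces A's indexed shift-and-mask loop with explicit (acc, sign) state by two staged
-- passes: digits of x in base 2^k extracted by repeated divmod, then a Horner fold of that
-- list high-to-low; return value only.

-- ===== PORT A =====
def fold_mod_2k_plus_1 (x : Int) (k : Int) : Int :=
  let M : Int := (1 : Int) <<< k.toNat + 1
  let mask : Int := (1 : Int) <<< k.toNat - 1
  let segs : Int := PySem.Int.floordiv (64 + k - 1) k
  let p := (PySem.List.pyRange 0 segs 1).foldl
    (fun (st : Int × Int) (i : Int) =>
      (PySem.Int.mod (st.1 + st.2 * PySem.Int.band (x >>> (i * k).toNat) mask) M, st.2 * (-1)))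
    (0, 1)
  PySem.Int.mod p.1 M

-- ===== PORT B =====
def fold_mod_2k_plus_1_alt (x : Int) (k : Int) : Int :=
  let B : Int := (1 : Int) <<< k.toNat
  let segs : Int := PySem.Int.floordiv (64 + k - 1) k
  -- stage 1: 'for _ in range(segs): q, r = divmod(q, B); digits.append(r)' on state (q, digits)
  let st := (List.range segs.toNat).foldl
    (fun (st : Int × List Int) _ =>
      (PySem.Int.floordiv st.1 B, st.2 ++ [PySem.Int.mod st.1 B]))
    (x, [])
  let M : Int := B + 1
  -- stage 2: 'for r in reversed(digits): acc = (r - acc) % M'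
  st.2.reverse.foldl (fun (acc : Int) (r : Int) => PySem.Int.mod (r - acc) M) 0

-- ===== PRECONDITION & SPEC =====
-- Python A raises for k ≤ 0 (ZeroDivisionError at k = 0, ValueError for the negative shift count when k < 0).
def Pre_fold_mod_2k_plus_1 (x : Int) (k : Int) : Prop := 1 ≤ k
instance (x : Int) (k : Int) : Decidable (Pre_fold_mod_2k_plus_1 x k) := by unfold Pre_fold_mod_2k_plus_1; infer_instance
def pvWitness_fold_mod_2k_plus_1 : Int × Int := (1234567, 8)

def Spec_fold_mod_2k_plus_1 (x : Int) (k : Int) (out : Int) : Prop := out = fold_mod_2k_plus_1_alt x k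
instance (x : Int) (k : Int) (out : Int) : Decidable (Spec_fold_mod_2k_plus_1 x k out) := by unfold Spec_fold_mod_2k_plus_1; infer_instance

-- ===== CLAIM (what is proved, stated in full; the proofs are below) =====
def Claim_equal_fold_mod_2k_plus_1 : Prop := ∀ (x : Int) (k : Int), Dom_fold_mod_2k_plus_1 x k → Pre_fold_mod_2k_plus_1 x k → Spec_fold_mod_2k_plus_1 x k (fold_mod_2k_plus_1 x k)

-- ===== LEMMAS AND PROOFS =====

/-- Alternating sum of `f` over a list: `f a₀ - f a₁ + f a₂ - …`. -/
def pvAltsum {α : Type} (f : α → Int) : List α → Int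
  | [] => 0
  | a :: t => f a - pvAltsum f t

lemma pvAltsum_map {α β : Type} (f : β → Int) (g : α → β) (l : List α) :
    pvAltsum f (l.map g) = pvAltsum (fun a => f (g a)) l := by
  induction l with
  | nil => rfl
  | cons a t ih => simp [pvAltsum, ih]

/-- `(a - s % M) % M = (a - s) % M`. -/
lemma pvSubModMod (M a s : Int) : (a - s % M) % M = (a - s) % M := by
  rw [Int.sub_emod a (s % M), Int.emod_emod_of_dvd _ dvd_rfl, ← Int.sub_emod]

/-- A's loop computes the alternating sum of its segments, mod M. -/
lemma pvFoldA (M : Int) (hM : 0 < M) (f : Int → Int) :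
    ∀ (l : List Int) (a s : Int),
      PySem.Int.mod
        ((l.foldl (fun (st : Int × Int) (i : Int) =>
            (PySem.Int.mod (st.1 + st.2 * f i) M, st.2 * (-1))) (a, s)).1) M
        = (a + s * pvAltsum f l) % M := by
  intro l
  induction l with
  | nil => intro a s; simp [pvAltsum, PySem.Int.mod_eq_emod_of_pos hM]
  | cons i t ih =>
      intro a s
      simp only [List.foldl_cons, pvAltsum]
      rw [ih, PySem.Int.mod_eq_emod_of_pos hM, Int.emod_add_emod]
      ring_nf

/-- Stage 1 of B: the divmod loop extracts the base-B digit list of q. -/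
lemma pvDigitsB (B : Int) (hB : 0 < B) (q : Int) (ds : List Int) :
    ∀ n : Nat,
      (List.range n).foldl
        (fun (st : Int × List Int) _ =>
          (PySem.Int.floordiv st.1 B, st.2 ++ [PySem.Int.mod st.1 B])) (q, ds)
      = (q / B ^ n, ds ++ (List.range n).map (fun i => q / B ^ i % B)) := by
  intro n
  induction n with
  | zero => simp [pow_zero]
  | succ n ih =>
      rw [List.range_succ, List.foldl_append, ih]
      simp only [List.foldl_cons, List.foldl_nil, List.map_append, List.map_cons,
        List.map_nil, ← List.append_assoc]
      rw [PySem.Int.floordiv_eq_ediv_of_pos hB, PySem.Int.mod_eq_emod_of_pos hB,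
        Int.ediv_ediv_of_nonneg (pow_nonneg (le_of_lt hB) n), ← pow_succ]

/-- Stage 2 of B: the reversed Horner fold computes the alternating sum of the list, mod M. -/
lemma pvRevFoldB (M : Int) (hM : 0 < M) :
    ∀ l : List Int,
      l.reverse.foldl (fun (acc : Int) (r : Int) => PySem.Int.mod (r - acc) M) 0
        = pvAltsum (fun r : Int => r) l % M := by
  intro l
  induction l with
  | nil => simp [pvAltsum]
  | cons a t ih =>
      simp only [List.reverse_cons, List.foldl_append, List.foldl_cons, List.foldl_nil,
        pvAltsum]
      rw [ih, PySem.Int.mod_eq_emod_of_pos hM, pvSubModMod]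

/-- Each shift-and-mask segment is the corresponding base-2^K digit. -/
lemma pvSegDigit (x : Int) (K j : Nat) :
    PySem.Int.band (x >>> (j * K)) ((2 : Int) ^ K - 1) = x / ((2 : Int) ^ K) ^ j % 2 ^ K := by
  have hle : (1 : Int) ≤ 2 ^ K := by
    have := pow_pos (by norm_num : (0 : Int) < 2) K; omega
  have hmask : ((2 : Int) ^ K - 1) = ((2 ^ K - 1 : Nat) : Int) := by
    push_cast [Nat.one_le_two_pow]; ring
  have hdig : ∀ a : Int, PySem.Int.band a ((2 : Int) ^ K - 1) = a % 2 ^ K := by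
    intro a
    by_cases ha : 0 ≤ a
    · rw [hmask, PySem.Int.band_of_nonneg ha (by positivity), Int.toNat_natCast,
        Nat.and_two_pow_sub_one_eq_mod]
      push_cast
      rw [Int.toNat_of_nonneg ha]
    · replace ha : a < 0 := by omega
      unfold PySem.Int.band
      rw [if_neg (by omega), if_pos (by rw [hmask]; positivity)]
      have h1 : ((2 : Int) ^ K - 1).toNat = 2 ^ K - 1 := by omega
      rw [h1, Nat.and_comm, Nat.and_two_pow_sub_one_eq_mod]
      have hn : ((-a - 1).toNat : Int) = -a - 1 := Int.toNat_of_nonneg (by omega)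
      have hmlt : (-a - 1).toNat % 2 ^ K < 2 ^ K := Nat.mod_lt _ (by positivity)
      have hle2 : (-a - 1).toNat % 2 ^ K ≤ 2 ^ K - 1 := by omega
      rw [Nat.cast_sub hle2, ← hmask]
      have hmodcast : (((-a - 1).toNat % 2 ^ K : Nat) : Int) = (-a - 1) % 2 ^ K := by
        push_cast
        rw [hn]
      rw [hmodcast]
      have hm1 : (0 : Int) ≤ (-a - 1) % 2 ^ K := Int.emod_nonneg _ (by positivity)
      have hm2 : (-a - 1) % 2 ^ K < 2 ^ K := Int.emod_lt_of_pos _ (by positivity)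
      have key : a % 2 ^ K = 2 ^ K - 1 - (-a - 1) % 2 ^ K := by
        have hd := Int.emod_add_mul_ediv (-a - 1) ((2 : Int) ^ K)
        have hstep : a % 2 ^ K
            = ((2 ^ K - 1 - (-a - 1) % 2 ^ K) + 2 ^ K * (-((-a - 1) / 2 ^ K) - 1)) % 2 ^ K := by
          congr 1
          linarith
        rw [hstep, Int.add_mul_emod_self_left,
          Int.emod_eq_of_lt (by linarith) (by linarith)]
      exact key.symm
  rw [hdig, Int.shiftRight_eq_div_pow]
  congr 1
  rw [← pow_mul, mul_comm K j]
  push_cast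
  ring_nf

-- ===== VERDICT (by name: the statement is the Claim_ definition above) =====
theorem fold_mod_2k_plus_1_spec : Claim_equal_fold_mod_2k_plus_1 := by
  intro x k _ hk
  replace hk : 1 ≤ k := hk
  unfold Spec_fold_mod_2k_plus_1 fold_mod_2k_plus_1 fold_mod_2k_plus_1_alt
  have h2 : ((1 : Int) <<< k.toNat) = 2 ^ k.toNat := by simp [Int.shiftLeft_eq]
  simp only [h2]
  have hM : (0 : Int) < 2 ^ k.toNat + 1 := by positivity
  have hB : (0 : Int) < 2 ^ k.toNat := by positivity
  rw [pvFoldA _ hM, pvDigitsB _ hB, List.nil_append, pvRevFoldB _ hM, pvAltsum_map,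
    PySem.List.pyRange_one, pvAltsum_map]
  have : (fun a : Nat => PySem.Int.band (x >>> ((0 + (a : Int)) * k).toNat)
            ((2 : Int) ^ k.toNat - 1))
        = fun j : Nat => x / ((2 : Int) ^ k.toNat) ^ j % 2 ^ k.toNat := by
    funext j
    have harg : ((0 + (j : Int)) * k).toNat = j * k.toNat := by
      have h0 : (0 + (j : Int)) * k = ((j * k.toNat : Nat) : Int) := by
        push_cast
        rw [Int.toNat_of_nonneg (by omega)]
        ring
      rw [h0, Int.toNat_natCast]
    rw [harg, pvSegDigit]
  rw [Int.sub_zero, this, zero_add, one_mul]
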